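-- pv_equiv track=rewrite | github.com/grant-TraDA/NLP-2024W | projects/PoCs/Wasielewska_Kubacki_Rucinski_Czerwonski/preprocessing/prepro2.py | group_conv
-- ===== SOURCE A (Python) =====
-- def group_conv(messages):
--   convs = []
--   n = len(messages)
--   prev_timestamp = messages[-1]['timestamp_ms']
--   convs.append([messages[-1]])
--   for i in range(n-2, -1, -1):
--     timestamp = messages[i]['timestamp_ms']
--     if (timestamp - prev_timestamp) < 28800000:
--       convs[-1].append(messages[i])
--     else:
--       convs.append([messages[i]])
--     prev_timestamp = timestamp
--   return convs
-- ===== SOURCE B (Python) =====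
-- def group_conv(messages):
--     r = messages[::-1]
--     convs = []
--     n = len(r)
--     i = 0
--     while i < n:
--         p = r[i]['timestamp_ms']
--         j = i + 1
--         while j < n and r[j]['timestamp_ms'] - p < 28800000:
--             p = r[j]['timestamp_ms']
--             j += 1
--         convs.append(r[i:j])
--         i = j
--     return convs
-- ===== Notes on version B (the rewrite author's own statement) =====
-- stated objective: alternative
-- what changed: A walks indices backwards carrying (conversations, prev_timestamp) state and appends each message into the last group in place; B reverses the list once and cuts it into maximal runs with an inner run-finding loop plus slicing, with no per-message group-mutation state.
import Mathlib
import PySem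

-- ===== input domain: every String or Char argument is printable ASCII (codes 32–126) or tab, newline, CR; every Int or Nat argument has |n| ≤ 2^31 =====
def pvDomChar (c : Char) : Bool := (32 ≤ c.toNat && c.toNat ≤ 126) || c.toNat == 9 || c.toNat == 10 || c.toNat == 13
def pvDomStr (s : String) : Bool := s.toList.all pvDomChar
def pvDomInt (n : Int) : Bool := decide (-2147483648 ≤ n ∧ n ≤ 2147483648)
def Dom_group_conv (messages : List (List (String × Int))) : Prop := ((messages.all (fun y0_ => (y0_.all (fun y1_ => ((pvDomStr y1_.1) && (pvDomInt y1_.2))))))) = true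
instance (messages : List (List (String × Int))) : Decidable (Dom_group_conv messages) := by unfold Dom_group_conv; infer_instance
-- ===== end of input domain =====

-- B changes the decomposition: instead of A's backward index loop carrying (convs, prev) state and
-- appending into the last group, B reverses once and cuts the reversed list into maximal runs
-- (inner while finds each run's length, outer loop slices it off); return value only, no mutation.

-- ===== PORT A =====
-- shared accessor: m['timestamp_ms'] (Pre_ guarantees the key is present)
def tsOf (m : List (String × Int)) : Int := ((PySem.Dict.mk m).get? "timestamp_ms").getD 0

def group_conv (messages : List (List (String × Int))) : List (List (List (String × Int))) :=
  let n : Int := messages.length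
  let last := (PySem.List.pyGet? messages (-1)).getD []
  let prev_timestamp := tsOf last
  let convs : List (List (List (String × Int))) := [[last]]
  ((PySem.List.pyRange (n - 2) (-1) (-1)).foldl
    (fun s i =>
      let msg := (PySem.List.pyGet? messages i).getD []
      let timestamp := tsOf msg
      if timestamp - s.2 < 28800000 then
        (s.1.dropLast ++ [s.1.getLastD [] ++ [msg]], timestamp)
      else
        (s.1 ++ [[msg]], timestamp))
    (convs, prev_timestamp)).1

-- ===== PORT B =====
-- inner while loop of Source B: how many further messages continue the run started by a message with timestamp p
def runLen (p : Int) : List (List (String × Int)) → Nat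
  | [] => 0
  | m :: t => if tsOf m - p < 28800000 then runLen (tsOf m) t + 1 else 0

-- outer while loop of Source B: slice off one run r[i:j] at a time
def chunk : List (List (String × Int)) → List (List (List (String × Int)))
  | [] => []
  | m :: t =>
    let r := runLen (tsOf m) t
    (m :: t.take r) :: chunk (t.drop r)
termination_by l => l.length
decreasing_by simp

def group_conv_alt (messages : List (List (String × Int))) : List (List (List (String × Int))) :=
  chunk messages.reverse

-- ===== PRECONDITION & SPEC =====
-- Pre_ excludes exactly the inputs where A raises: the empty list (IndexError on messages[-1])
-- and messages lacking the 'timestamp_ms' key (KeyError).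
def Pre_group_conv (messages : List (List (String × Int))) : Prop :=
  messages ≠ [] ∧ ∀ m ∈ messages, ((PySem.Dict.mk m).get? "timestamp_ms").isSome = true
instance (messages : List (List (String × Int))) : Decidable (Pre_group_conv messages) := by
  unfold Pre_group_conv; infer_instance

def pvWitness_group_conv : (List (List (String × Int))) := [[("timestamp_ms", 0)]]

def Spec_group_conv (messages : List (List (String × Int))) (out : List (List (List (String × Int)))) : Prop := out = group_conv_alt messages
instance (messages : List (List (String × Int))) (out : List (List (List (String × Int)))) : Decidable (Spec_group_conv messages out) := by unfold Spec_group_conv; infer_instance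

-- ===== CLAIM (what is proved, stated in full; the proofs are below) =====
def Claim_equal_group_conv : Prop := ∀ (messages : List (List (String × Int))), Dom_group_conv messages → Pre_group_conv messages → Spec_group_conv messages (group_conv messages)

-- ===== LEMMAS AND PROOFS =====

-- A's loop body, with the fetched message abstracted out
def stepA (s : List (List (List (String × Int))) × Int) (m : List (String × Int)) :
    List (List (List (String × Int))) × Int :=
  if tsOf m - s.2 < 28800000 then
    (s.1.dropLast ++ [s.1.getLastD [] ++ [m]], tsOf m)
  else
    (s.1 ++ [[m]], tsOf m)

-- the messages A's loop fetches, in order, are the reversed list without its head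
lemma fetch_eq (messages : List (List (String × Int))) :
    (PySem.List.pyRange ((messages.length : Int) - 2) (-1) (-1)).map
      (fun i => (PySem.List.pyGet? messages i).getD []) = messages.reverse.tail := by
  rw [PySem.List.pyRange_neg_one, List.map_map]
  have hlen : (((messages.length : Int) - 2) - (-1)).toNat = messages.length - 1 := by omega
  rw [hlen]
  apply List.ext_getElem
  · simp
  · intro k h1 h2
    simp only [List.getElem_map, List.getElem_range, Function.comp]
    have hk : k < messages.length - 1 := by simpa using h1
    rw [PySem.List.pyGet?_of_nonneg messages (by omega)]
    have ht : ((messages.length : Int) - 2 - (k : Int)).toNat = messages.length - 2 - k := by omega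
    rw [ht, List.getElem_tail, List.getElem_reverse]
    rw [List.getElem?_eq_getElem (by omega)]
    simp only [Option.getD_some]
    congr 1
    omega

-- invariant of A's fold: it appends onto the accumulated groups exactly the runs of the remainder
lemma foldA (t : List (List (String × Int))) :
    ∀ (convs : List (List (List (String × Int)))) (c : List (List (String × Int))) (p : Int),
      (t.foldl stepA (convs ++ [c], p)).1
        = convs ++ (c ++ t.take (runLen p t)) :: chunk (t.drop (runLen p t)) := by
  induction t with
  | nil => intro convs c p; simp [runLen, chunk]
  | cons m t ih =>
    intro convs c p
    simp only [List.foldl_cons, runLen]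
    by_cases h : tsOf m - p < 28800000
    · rw [show stepA (convs ++ [c], p) m = (convs ++ [c ++ [m]], tsOf m) by
        simp [stepA, h]]
      rw [ih convs (c ++ [m]) (tsOf m)]
      simp [h, List.take_succ_cons, List.append_assoc]
    · rw [show stepA (convs ++ [c], p) m = ((convs ++ [c]) ++ [[m]], tsOf m) by
        simp [stepA, h]]
      rw [ih (convs ++ [c]) [m] (tsOf m)]
      rw [if_neg h, List.take_zero, List.drop_zero,
        show chunk (m :: t) = (m :: t.take (runLen (tsOf m) t)) :: chunk (t.drop (runLen (tsOf m) t)) from by rw [chunk]]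
      simp

-- ===== VERDICT (by name: the statement is the Claim_ definition above) =====
theorem group_conv_spec : Claim_equal_group_conv := by
  intro messages _ hpre
  obtain ⟨hne, -⟩ := hpre
  unfold Spec_group_conv group_conv_alt
  obtain ⟨x, t, hr⟩ : ∃ x t, messages.reverse = x :: t := by
    cases h : messages.reverse with
    | nil => exact absurd (by simpa using h) hne
    | cons a b => exact ⟨a, b, rfl⟩
  have hlast : (PySem.List.pyGet? messages (-1)).getD [] = x := by
    rw [PySem.List.pyGet?_neg_one, List.getLast?_eq_head?_reverse, hr]; rfl
  have hport : group_conv messages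
      = ((messages.reverse.tail).foldl stepA ([[x]], tsOf x)).1 := by
    unfold group_conv
    rw [← fetch_eq messages, List.foldl_map, ← hlast]
    rfl
  rw [hport, hr]
  have hfa := foldA t [] [x] (tsOf x)
  simp only [List.nil_append] at hfa
  rw [show (x :: t).tail = t from rfl, hfa,
    show chunk (x :: t)
        = (x :: t.take (runLen (tsOf x) t)) :: chunk (t.drop (runLen (tsOf x) t)) from by rw [chunk]]
  simp
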